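-- pv_equiv track=rewrite | github.com/v-garmed/Enfoques_IA | ENFOQUES/03_ENFOQUE LOGICA/005_PLANIFICACION/002_Espacio de Estados.py | buscar_solucion
-- ===== SOURCE A (Python) =====
-- def acciones_posibles(estado):
--     return [estado + 1, estado + 2]
--
-- def buscar_solucion(estado_actual, estado_objetivo, camino):
--     # Si el estado actual es el estado objetivo, se retorna el camino encontrado
--     if estado_actual == estado_objetivo:
--         return camino
--     # Explora las acciones posibles desde el estado actual
--     for siguiente_estado in acciones_posibles(estado_actual):
--         # Llama recursivamente para buscar una solución desde el siguiente estado
--         resultado = buscar_solucion(siguiente_estado, estado_objetivo, camino + [siguiente_estado])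
--         # Si se encuentra una solución, se retorna
--         if resultado:
--             return resultado
--     # Si no se encuentra solución, retorna None
--     return None
-- ===== SOURCE B (Python) =====
-- def buscar_solucion(estado_actual, estado_objetivo, camino):
--     # Closed form: the successful path A finds is the +1-walk from estado_actual to estado_objetivo.
--     if estado_actual == estado_objetivo:
--         return camino
--     return camino + list(range(estado_actual + 1, estado_objetivo + 1))
-- ===== Notes on version B (the rewrite author's own statement) =====
-- stated objective: simpler
-- what changed: Replaces the branching recursive DFS (try +1 then +2, truthiness-test the result) with a closed-form append of range(estado_actual+1, estado_objetivo+1), since the +1 branch always succeeds first.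
import Mathlib
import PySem

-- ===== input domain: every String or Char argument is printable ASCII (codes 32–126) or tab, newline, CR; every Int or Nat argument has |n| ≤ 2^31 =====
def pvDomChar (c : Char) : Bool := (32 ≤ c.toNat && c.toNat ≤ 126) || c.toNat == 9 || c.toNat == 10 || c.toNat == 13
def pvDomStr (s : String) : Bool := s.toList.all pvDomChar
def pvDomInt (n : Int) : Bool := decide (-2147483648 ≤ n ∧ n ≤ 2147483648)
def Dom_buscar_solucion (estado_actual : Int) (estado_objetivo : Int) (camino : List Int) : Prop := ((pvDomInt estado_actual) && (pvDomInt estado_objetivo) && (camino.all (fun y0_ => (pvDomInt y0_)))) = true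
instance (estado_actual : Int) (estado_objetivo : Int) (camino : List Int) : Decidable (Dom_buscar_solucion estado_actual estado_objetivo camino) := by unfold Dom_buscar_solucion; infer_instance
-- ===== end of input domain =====

-- B replaces A's branching recursive search (try +1 then +2, truthiness-test the result)
-- with a closed-form append of the +1-walk range — simpler, no recursion.


-- ===== PORT A =====
-- Literal port of A's recursive DFS.  When estado_objetivo < estado_actual the Python
-- recurses without bound and raises RecursionError; the port returns none there
-- (that region is excluded by Pre_buscar_solucion).  'if resultado:' is Python
-- truthiness: true iff the result is a non-None, non-empty list — ported as .getD [] ≠ [].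
def buscar_solucion (estado_actual : Int) (estado_objetivo : Int) (camino : List Int) : Option (List Int) :=
  if estado_actual = estado_objetivo then some camino
  else if estado_objetivo < estado_actual then none  -- Python: unbounded recursion (RecursionError)
  else
    -- for siguiente_estado in [estado_actual+1, estado_actual+2]:
    let r1 := buscar_solucion (estado_actual + 1) estado_objetivo (camino ++ [estado_actual + 1])
    if r1.getD [] ≠ [] then r1
    else
      let r2 := buscar_solucion (estado_actual + 2) estado_objetivo (camino ++ [estado_actual + 2])
      if r2.getD [] ≠ [] then r2
      else none
termination_by (estado_objetivo - estado_actual).toNat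
decreasing_by all_goals omega

-- ===== PORT B =====
def buscar_solucion_alt (estado_actual : Int) (estado_objetivo : Int) (camino : List Int) : Option (List Int) :=
  if estado_actual = estado_objetivo then some camino
  else some (camino ++ PySem.List.pyRange (estado_actual + 1) (estado_objetivo + 1) 1)

-- ===== PRECONDITION & SPEC =====
-- Pre_ excludes estado_actual > estado_objetivo, where the Python A recurses without
-- bound and raises RecursionError (no value is returned).
def Pre_buscar_solucion (estado_actual : Int) (estado_objetivo : Int) (camino : List Int) : Prop :=
  estado_actual ≤ estado_objetivo
instance (estado_actual : Int) (estado_objetivo : Int) (camino : List Int) : Decidable (Pre_buscar_solucion estado_actual estado_objetivo camino) := by unfold Pre_buscar_solucion; infer_instance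
def pvWitness_buscar_solucion : Int × Int × List Int := (2, 5, [1, 2])

def Spec_buscar_solucion (estado_actual : Int) (estado_objetivo : Int) (camino : List Int) (out : Option (List Int)) : Prop := out = buscar_solucion_alt estado_actual estado_objetivo camino
instance (estado_actual : Int) (estado_objetivo : Int) (camino : List Int) (out : Option (List Int)) : Decidable (Spec_buscar_solucion estado_actual estado_objetivo camino out) := by unfold Spec_buscar_solucion; infer_instance

-- ===== CLAIM (what is proved, stated in full; the proofs are below) =====
def Claim_equal_buscar_solucion : Prop := ∀ (estado_actual : Int) (estado_objetivo : Int) (camino : List Int), Dom_buscar_solucion estado_actual estado_objetivo camino → Pre_buscar_solucion estado_actual estado_objetivo camino → Spec_buscar_solucion estado_actual estado_objetivo camino (buscar_solucion estado_actual estado_objetivo camino)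

-- ===== LEMMAS AND PROOFS =====
-- On a strictly ascending instance A's +1 branch always succeeds, yielding the +1-walk.
theorem buscar_solucion_lt (a o : Int) (camino : List Int) (h : a < o) :
    buscar_solucion a o camino = some (camino ++ PySem.List.pyRange (a + 1) (o + 1) 1) := by
  rw [buscar_solucion, if_neg (by omega : ¬ a = o), if_neg (by omega : ¬ o < a)]
  by_cases h1 : a + 1 = o
  · rw [show buscar_solucion (a + 1) o (camino ++ [a + 1]) = some (camino ++ [a + 1]) from by
      rw [buscar_solucion, if_pos h1]]
    simp [PySem.List.pyRange_one_cons (show a + 1 < o + 1 by omega),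
      PySem.List.pyRange_one_eq_nil (show o + 1 ≤ a + 1 + 1 by omega)]
  · rw [buscar_solucion_lt (a + 1) o (camino ++ [a + 1]) (by omega)]
    simp [PySem.List.pyRange_one_cons (show a + 1 < o + 1 by omega)]
termination_by (o - a).toNat
decreasing_by omega

-- ===== VERDICT (by name: the statement is the Claim_ definition above) =====
theorem buscar_solucion_spec : Claim_equal_buscar_solucion := by
  intro a o camino _ hpre
  unfold Spec_buscar_solucion buscar_solucion_alt
  by_cases h : a = o
  · subst h; rw [buscar_solucion, if_pos rfl, if_pos rfl]
  · rw [buscar_solucion_lt a o camino (by unfold Pre_buscar_solucion at hpre; omega), if_neg h]
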